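-- pv_equiv track=rewrite | github.com/trevphil/password-permutor | permutor.py | capitalization_combos
-- ===== SOURCE A (Python) =====
-- def can_case(string):
--     if string is None or len(string) < 1:
--         return False
--     return string[0].lower() != string[0].upper()
--
-- def first_letter_reversed(string):
--     if string[0].lower() == string[0]:
--         return '{}{}'.format(string[0].upper(), string[1:])
--     else:
--         return '{}{}'.format(string[0].lower(), string[1:])
--
-- def capitalization_combos(wordlist):
--     wordlists = []
--     wordlists.append(wordlist)
--
--     n = len(wordlist)
--
--     for i in range(n):
--         new_list = []
--         for current_list in wordlists:
--             if can_case(current_list[i]):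
--                 tmp = list(current_list) # make a copy
--                 tmp[i] = first_letter_reversed(current_list[i])
--                 new_list.append(tmp)
--         wordlists += new_list
--
--     return wordlists
-- ===== SOURCE B (Python) =====
-- def can_case(string):
--     if string is None or len(string) < 1:
--         return False
--     return string[0].lower() != string[0].upper()
--
-- def first_letter_reversed(string):
--     if string[0].lower() == string[0]:
--         return '{}{}'.format(string[0].upper(), string[1:])
--     else:
--         return '{}{}'.format(string[0].lower(), string[1:])
--
-- def capitalization_combos(wordlist):
--     positions = [i for i in range(len(wordlist)) if can_case(wordlist[i])]
--     m = len(positions)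
--     result = [wordlist]
--     for k in range(1, 1 << m):
--         tmp = list(wordlist)
--         for j in range(m):
--             if k & (1 << j):
--                 tmp[positions[j]] = first_letter_reversed(wordlist[positions[j]])
--         result.append(tmp)
--     return result
-- ===== Notes on version B (the rewrite author's own statement) =====
-- stated objective: alternative
-- what changed: replaces A's repeated doubling of the list of wordlists (appending a flipped copy of every list so far, position by position) with a direct bitmask enumeration: compute the caseable positions once, then for each k in range(1, 2**m) build the k-th combination from the original wordlist by flipping exactly the positions whose bit is set
import Mathlib
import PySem

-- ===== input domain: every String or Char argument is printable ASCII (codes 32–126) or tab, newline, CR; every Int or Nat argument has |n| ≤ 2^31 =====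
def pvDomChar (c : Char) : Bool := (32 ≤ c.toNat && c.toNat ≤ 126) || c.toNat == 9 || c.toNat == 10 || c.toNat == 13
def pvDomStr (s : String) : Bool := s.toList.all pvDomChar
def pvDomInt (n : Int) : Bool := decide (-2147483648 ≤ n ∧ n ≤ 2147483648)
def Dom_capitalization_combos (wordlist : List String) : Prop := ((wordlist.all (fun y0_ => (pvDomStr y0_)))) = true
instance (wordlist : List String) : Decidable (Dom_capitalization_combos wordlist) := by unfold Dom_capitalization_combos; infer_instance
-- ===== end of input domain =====

-- B replaces A's repeated list-doubling with a direct bitmask enumeration of the caseable positions; same return value (alternative decomposition, not claimed faster).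


-- ===== PORT A =====
-- can_case(string): empty → False, else string[0].lower() != string[0].upper()
-- (single-character .lower()/.upper() ported as PySem.Chars.lowerChar/upperChar on the first char; exact on the ASCII domain)
def pvCanCase (s : String) : Bool :=
  match s.toList with
  | [] => false
  | c :: _ => PySem.Chars.lowerChar c != PySem.Chars.upperChar c

-- first_letter_reversed(string); both programs only call it on strings with can_case = True
-- (nonempty), so the [] branch is unreachable (Python would raise IndexError there)
def pvFirstLetterReversed (s : String) : String :=
  match s.toList with
  | [] => s
  | c :: rest =>
    if PySem.Chars.lowerChar c = c then String.ofList (PySem.Chars.upperChar c :: rest)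
    else String.ofList (PySem.Chars.lowerChar c :: rest)

-- literal port of A: wordlists = [wordlist]; for i in range(n): new_list built by an inner
-- loop over wordlists appending flipped copies; wordlists += new_list
def capitalization_combos (wordlist : List String) : List (List String) :=
  (List.range wordlist.length).foldl
    (fun wordlists i =>
      wordlists ++ wordlists.foldl
        (fun newList cur =>
          if pvCanCase (cur.getD i "") then
            newList ++ [cur.set i (pvFirstLetterReversed (cur.getD i ""))]
          else newList) [])
    [wordlist]

-- ===== PORT B =====
-- literal port of Source B: positions of caseable words computed once, then one combination per
-- bitmask k in range(1, 1 << m), flipping exactly the positions whose bit of k is set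
def capitalization_combos_alt (wordlist : List String) : List (List String) :=
  let positions := (List.range wordlist.length).filter (fun i => pvCanCase (wordlist.getD i ""))
  let m := positions.length
  [wordlist] ++ (List.range' 1 ((1 <<< m) - 1)).map (fun k =>
    (List.range m).foldl
      (fun tmp j =>
        if k &&& (1 <<< j) ≠ 0 then
          tmp.set (positions.getD j 0) (pvFirstLetterReversed (wordlist.getD (positions.getD j 0) ""))
        else tmp)
      wordlist)

-- ===== PRECONDITION & SPEC =====
def Spec_capitalization_combos (wordlist : List String) (out : List (List String)) : Prop := out = capitalization_combos_alt wordlist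
instance (wordlist : List String) (out : List (List String)) : Decidable (Spec_capitalization_combos wordlist out) := by unfold Spec_capitalization_combos; infer_instance

-- ===== CLAIM (what is proved, stated in full; the proofs are below) =====
def Claim_equal_capitalization_combos : Prop := ∀ (wordlist : List String), Dom_capitalization_combos wordlist → Spec_capitalization_combos wordlist (capitalization_combos wordlist)

-- ===== LEMMAS AND PROOFS =====

-- flip the word at position p to its first-letter-reversed form (value taken from the ORIGINAL wordlist w)
def pvFlip (w : List String) (p : Nat) (xs : List String) : List String :=
  xs.set p (pvFirstLetterReversed (w.getD p ""))

-- the combination described by bitmask k over position list P (bit j ↔ P[j]); B's inner loop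
def pvBuild (w : List String) (P : List Nat) (k : Nat) : List String :=
  (List.range P.length).foldl
    (fun tmp j => if k &&& (1 <<< j) ≠ 0 then pvFlip w (P.getD j 0) tmp else tmp) w

theorem pvBuild_zero (w : List String) (P : List Nat) : pvBuild w P 0 = w := by
  unfold pvBuild
  simp [Nat.zero_and]

theorem pvBuild_lt (w : List String) (P : List Nat) (p : Nat) (k : Nat) (hk : k < 2 ^ P.length) :
    pvBuild w (P ++ [p]) k = pvBuild w P k := by
  unfold pvBuild
  simp only [List.length_append, List.length_cons, List.length_nil, List.range_succ,
    List.foldl_append, List.foldl_cons, List.foldl_nil]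
  rw [if_neg (by simp [Nat.one_shiftLeft, Nat.and_two_pow, Nat.testBit_lt_two_pow hk])]
  apply PySem.List.foldl_congr_mem
  intro a b hb
  have hblt : b < P.length := List.mem_range.mp (by simpa using hb)
  rw [List.getD_append _ _ _ _ hblt]

theorem pvBuild_add (w : List String) (P : List Nat) (p : Nat) (k : Nat) (hk : k < 2 ^ P.length) :
    pvBuild w (P ++ [p]) (2 ^ P.length + k) = pvFlip w p (pvBuild w P k) := by
  unfold pvBuild
  simp only [List.length_append, List.length_cons, List.length_nil, List.range_succ,
    List.foldl_append, List.foldl_cons, List.foldl_nil]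
  rw [if_pos (by simp [Nat.one_shiftLeft, Nat.and_two_pow, Nat.testBit_two_pow_add_eq,
        Nat.testBit_lt_two_pow hk])]
  have hget : (P ++ [p]).getD P.length 0 = p := by
    simp [List.getD]
  rw [hget]
  congr 1
  apply PySem.List.foldl_congr_mem
  intro a b hb
  have hblt : b < P.length := List.mem_range.mp (by simpa using hb)
  rw [List.getD_append _ _ _ _ hblt]
  simp [Nat.one_shiftLeft, Nat.and_two_pow, Nat.testBit_two_pow_add_gt hblt]

-- the doubling fold (A's essence) enumerates exactly the bitmask combinations, in counting order
theorem pvDouble_eq_build (w : List String) (P : List Nat) :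
    List.foldl (fun L p => L ++ L.map (pvFlip w p)) [w] P
      = (List.range (2 ^ P.length)).map (pvBuild w P) := by
  induction P using List.reverseRecOn with
  | nil =>
    have h0 : pvBuild w [] 0 = w := pvBuild_zero w []
    simp [h0]
  | append_singleton P p ih =>
    rw [List.foldl_append, ih]
    simp only [List.foldl_cons, List.foldl_nil]
    have hlen : 2 ^ (P ++ [p]).length = 2 ^ P.length + 2 ^ P.length := by
      simp [List.length_append, pow_succ]; ring
    rw [hlen, List.range_add, List.map_append, List.map_map, List.map_map]
    congr 1
    · exact List.map_congr_left fun k hk => (pvBuild_lt w P p k (List.mem_range.mp hk)).symm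
    · apply List.map_congr_left
      intro k hk
      simp only [Function.comp]
      exact (pvBuild_add w P p k (List.mem_range.mp hk)).symm

-- A's fold over range n equals the doubling fold over the caseable positions:
-- every list in the accumulator still agrees with w at all unprocessed positions
theorem pvA_eq_double (w : List String) (is : List Nat) (L : List (List String))
    (hinv : ∀ x ∈ L, ∀ j ∈ is, x.getD j "" = w.getD j "")
    (hnd : is.Pairwise (· ≠ ·)) :
    List.foldl
      (fun wordlists i =>
        wordlists ++ wordlists.foldl
          (fun newList cur =>
            if pvCanCase (cur.getD i "") then
              newList ++ [cur.set i (pvFirstLetterReversed (cur.getD i ""))]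
            else newList) []) L is
      = List.foldl (fun L p => L ++ L.map (pvFlip w p)) L
          (is.filter (fun i => pvCanCase (w.getD i ""))) := by
  induction is generalizing L with
  | nil => simp
  | cons i rest ih =>
    have hi : ∀ x ∈ L, x.getD i "" = w.getD i "" := fun x hx => hinv x hx i (by simp)
    have hne : ∀ j ∈ rest, i ≠ j := (List.pairwise_cons.mp hnd).1
    have hnd' : rest.Pairwise (· ≠ ·) := (List.pairwise_cons.mp hnd).2
    simp only [List.foldl_cons, List.filter_cons]
    rw [PySem.List.foldl_append_if]
    have hstep : L ++ (L.filter (fun cur => pvCanCase (cur.getD i ""))).map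
        (fun cur => cur.set i (pvFirstLetterReversed (cur.getD i "")))
        = if pvCanCase (w.getD i "") then L ++ L.map (pvFlip w i) else L := by
      by_cases h : pvCanCase (w.getD i "") = true
      · rw [if_pos h]
        congr 1
        rw [List.filter_eq_self.mpr (fun x hx => by rw [hi x hx]; exact h)]
        exact List.map_congr_left (fun x hx => by unfold pvFlip; rw [hi x hx])
      · rw [if_neg h]
        have hfil : L.filter (fun cur => pvCanCase (cur.getD i "")) = [] :=
          List.filter_eq_nil_iff.mpr (fun x hx => by rw [hi x hx]; simpa using h)
        rw [hfil, List.map_nil, List.append_nil]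
    rw [List.nil_append, hstep]
    have hinv2 : ∀ x ∈ L ++ L.map (pvFlip w i),
        ∀ j ∈ rest, x.getD j "" = w.getD j "" := by
      intro x hx j hj
      rcases List.mem_append.mp hx with hx | hx
      · exact hinv x hx j (by simp [hj])
      · rcases List.mem_map.mp hx with ⟨y, hy, rfl⟩
        have hset : (pvFlip w i y).getD j "" = y.getD j "" := by
          unfold pvFlip
          simp [List.getD_eq_getElem?_getD, List.getElem?_set_ne (hne j hj)]
        rw [hset]; exact hinv y hy j (by simp [hj])
    by_cases h : pvCanCase (w.getD i "") = true
    · rw [if_pos h] at hstep ⊢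
      simp only [h, if_true]
      rw [ih _ hinv2 hnd']
      simp
    · rw [if_neg h] at hstep ⊢
      have hb : pvCanCase (w.getD i "") = false := by simpa using h
      simp only [hb, Bool.false_eq_true, if_false]
      exact ih _ (fun x hx j hj => hinv x hx j (by simp [hj])) hnd'

theorem pvRange_pow_cons (m : Nat) :
    List.range (2 ^ m) = 0 :: List.range' 1 ((1 <<< m) - 1) := by
  rw [Nat.one_shiftLeft, List.range_eq_range']
  have h : 2 ^ m = (2 ^ m - 1) + 1 := by
    have := Nat.one_le_two_pow (n := m); omega
  rw [h, List.range'_succ]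
  simp

-- ===== VERDICT (by name: the statement is the Claim_ definition above) =====
theorem capitalization_combos_spec : Claim_equal_capitalization_combos := by
  intro w _
  unfold Spec_capitalization_combos
  show capitalization_combos w = capitalization_combos_alt w
  unfold capitalization_combos capitalization_combos_alt
  rw [pvA_eq_double w (List.range w.length) [w]
      (by intro x hx j _; rw [List.mem_singleton.mp hx])
      ((List.pairwise_lt_range).imp fun h => Nat.ne_of_lt h)]
  rw [pvDouble_eq_build, pvRange_pow_cons, List.map_cons, pvBuild_zero]
  rfl
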